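-- pv_equiv track=rewrite | github.com/blopit/Cursor-Template-Repo | tools/git_automation.py | create_commit_message
-- ===== SOURCE A (Python) =====
-- from typing import List, Optional
--
-- def create_commit_message(files: List[str], message: str) -> str:
--     """Create a standardized commit message."""
--     # Determine commit type based on files changed
--     commit_type = "chore"
--     if any(f.startswith('test') for f in files):
--         commit_type = "test"
--     elif any(f.endswith('.md') for f in files):
--         commit_type = "docs"
--     elif any(f.startswith('tools/') for f in files):
--         commit_type = "feat"
--
--     # Create commit message
--     commit_msg = f"[Cursor] {commit_type}: {message}\n\nChanged files:\n"
--     for file in files: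
--         commit_msg += f"- {file}\n"
--
--     return commit_msg
-- ===== SOURCE B (Python) =====
-- def create_commit_message(files, message):
--     """Create a standardized commit message."""
--     # Per-file priority rank; overall type = table[min rank] (min over empty = 3 -> chore).
--     TYPES = ["test", "docs", "feat", "chore"]
--
--     def rank(f):
--         if f.startswith('test'):
--             return 0
--         if f.endswith('.md'):
--             return 1
--         if f.startswith('tools/'):
--             return 2
--         return 3
--
--     commit_type = TYPES[min(map(rank, files), default=3)]
--     body = "".join(f"- {f}\n" for f in files)
--     return f"[Cursor] {commit_type}: {message}\n\nChanged files:\n{body}"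
-- ===== Notes on version B (the rewrite author's own statement) =====
-- stated objective: alternative
-- what changed: Instead of three prioritized any() scans plus an if/elif chain, B maps each file to a numeric priority rank, takes the minimum rank over the list (default 3) and indexes a type table; the file list is built with ''.join of a comprehension instead of += accumulation.
import Mathlib
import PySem

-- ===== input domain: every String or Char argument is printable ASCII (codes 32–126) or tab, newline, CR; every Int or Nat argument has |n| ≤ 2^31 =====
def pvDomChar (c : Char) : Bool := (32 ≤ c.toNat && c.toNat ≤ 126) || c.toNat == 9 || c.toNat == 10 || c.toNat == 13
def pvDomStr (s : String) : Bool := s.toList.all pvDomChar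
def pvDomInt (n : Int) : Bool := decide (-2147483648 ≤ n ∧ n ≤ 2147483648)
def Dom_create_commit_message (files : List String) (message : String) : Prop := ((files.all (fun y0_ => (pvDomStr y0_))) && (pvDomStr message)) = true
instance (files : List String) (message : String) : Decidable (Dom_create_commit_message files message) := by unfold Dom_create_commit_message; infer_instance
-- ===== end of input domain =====

-- B replaces A's three prioritized any() scans + if/elif chain by ranking each file
-- numerically and indexing a type table with the minimum rank (alternative, same cost).

-- ===== PORT A =====
def create_commit_message (files : List String) (message : String) : String :=
  let commit_type : String :=
    if files.any (fun f => PySem.Str.startswith f "test") then "test"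
    else if files.any (fun f => PySem.Str.endswith f ".md") then "docs"
    else if files.any (fun f => PySem.Str.startswith f "tools/") then "feat"
    else "chore"
  let commit_msg := "[Cursor] " ++ commit_type ++ ": " ++ message ++ "\n\nChanged files:\n"
  files.foldl (fun acc file => acc ++ ("- " ++ file ++ "\n")) commit_msg

-- ===== PORT B =====
-- per-file priority rank (Source B's rank helper)
def pvRank (f : String) : Nat :=
  if PySem.Str.startswith f "test" then 0
  else if PySem.Str.endswith f ".md" then 1
  else if PySem.Str.startswith f "tools/" then 2
  else 3

def create_commit_message_alt (files : List String) (message : String) : String :=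
  let types : List String := ["test", "docs", "feat", "chore"]
  -- min(map(rank, files), default=3); the index is always < 4, so getD's default is never used
  let m : Nat := (files.map pvRank).foldl min 3
  let commit_type := types.getD m "chore"
  "[Cursor] " ++ commit_type ++ ": " ++ message ++ "\n\nChanged files:\n"
    ++ PySem.Str.join "" (files.map (fun f => "- " ++ f ++ "\n"))

-- ===== PRECONDITION & SPEC =====
def Spec_create_commit_message (files : List String) (message : String) (out : String) : Prop := out = create_commit_message_alt files message
instance (files : List String) (message : String) (out : String) : Decidable (Spec_create_commit_message files message out) := by unfold Spec_create_commit_message; infer_instance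

-- ===== CLAIM (what is proved, stated in full; the proofs are below) =====
def Claim_equal_create_commit_message : Prop := ∀ (files : List String) (message : String), Dom_create_commit_message files message → Spec_create_commit_message files message (create_commit_message files message)

-- ===== LEMMAS AND PROOFS =====

-- the rank A's if/elif chain corresponds to
def pvChainRank (files : List String) : Nat :=
  if files.any (fun f => PySem.Str.startswith f "test") then 0
  else if files.any (fun f => PySem.Str.endswith f ".md") then 1
  else if files.any (fun f => PySem.Str.startswith f "tools/") then 2
  else 3

-- B's min-of-ranks equals A's priority chain.
theorem rank_min (files : List String) (a : Nat) (ha : a ≤ 3) :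
    (files.map pvRank).foldl min a = min a (pvChainRank files) := by
  induction files generalizing a with
  | nil => simp [pvChainRank]; omega
  | cons x xs ih =>
      simp only [List.map_cons, List.foldl_cons]
      rw [ih (min a (pvRank x)) (by unfold pvRank; split_ifs <;> omega)]
      cases h1 : PySem.Str.startswith x "test" <;>
        cases h2 : PySem.Str.endswith x ".md" <;>
          cases h3 : PySem.Str.startswith x "tools/" <;>
            simp only [pvChainRank, pvRank, List.any_cons, h1, h2, h3, Bool.false_or,
              Bool.true_or, if_true] <;>
              split_ifs <;> simp_all

-- A's += loop builds the same string as join of the per-file comprehension.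
theorem foldl_append_eq_join (files : List String) (s : String) :
    files.foldl (fun acc file => acc ++ ("- " ++ file ++ "\n")) s
    = s ++ PySem.Str.join "" (files.map (fun f => "- " ++ f ++ "\n")) := by
  induction files generalizing s with
  | nil => simp [PySem.Str.join]
  | cons x xs ih =>
      simp only [List.foldl, List.map, ih]
      cases xs with
      | nil =>
          apply String.toList_inj.mp
          simp [PySem.Str.join, PySem.Chars.join, List.intercalate]
      | cons y ys =>
          apply String.toList_inj.mp
          simp [PySem.Str.join, PySem.Chars.join_cons_cons]

-- ===== VERDICT (by name: the statement is the Claim_ definition above) =====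
theorem create_commit_message_spec : Claim_equal_create_commit_message := by
  intro files message _
  unfold Spec_create_commit_message create_commit_message create_commit_message_alt
  rw [rank_min files 3 (le_refl 3), foldl_append_eq_join]
  unfold pvChainRank
  split_ifs <;> rfl
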